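-- pv_equiv track=rewrite | github.com/BDDClass/python-learning | PythonProjects/CS1350_AB_midterm_benjamin_deuel.py | get_students_in_multiple_clubs
-- ===== SOURCE A (Python) =====
-- def get_students_in_multiple_clubs(clubs):
--     students = {}
--     for club in clubs:
--         for name in clubs[club]:
--             if name in students:
--                 students[name] += 1
--             else:
--                 students.update({name: 1})
--     studentSet = set()
--     for student in students:
--         if students[student] > 1:
--             studentSet.add(student)
--     return studentSet
-- ===== SOURCE B (Python) =====
-- def get_students_in_multiple_clubs(clubs):
--     names = [name for members in clubs.values() for name in members]
--     return {name for i, name in enumerate(names) if name in names[i + 1:]}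
-- ===== Notes on version B (the rewrite author's own statement) =====
-- stated objective: simpler
-- what changed: Replaces the count-dict build plus filtering pass with flattening all rosters once and a single set comprehension keeping each name that occurs again later in the combined roster (no counts, no dict).
import Mathlib
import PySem

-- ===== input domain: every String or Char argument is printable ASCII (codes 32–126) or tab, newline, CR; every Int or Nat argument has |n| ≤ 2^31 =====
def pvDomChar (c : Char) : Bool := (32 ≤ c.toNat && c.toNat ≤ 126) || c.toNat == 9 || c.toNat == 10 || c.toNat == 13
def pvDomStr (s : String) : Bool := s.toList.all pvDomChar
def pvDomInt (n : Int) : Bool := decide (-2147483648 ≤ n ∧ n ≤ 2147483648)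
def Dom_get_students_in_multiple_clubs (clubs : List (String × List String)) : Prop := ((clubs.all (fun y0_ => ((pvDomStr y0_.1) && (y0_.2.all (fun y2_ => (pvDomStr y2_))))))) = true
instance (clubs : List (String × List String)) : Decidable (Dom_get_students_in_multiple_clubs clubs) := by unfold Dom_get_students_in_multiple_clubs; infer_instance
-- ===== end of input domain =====

-- B replaces A's count-dict build plus filtering pass by one set comprehension over the
-- flattened roster keeping each name that occurs again later (objective: simpler).

-- ===== PORT A =====
-- 'for club in clubs: for name in clubs[club]' walks the dict's pairs in order;
-- 'students[name] += 1' on a present key is Dict.modify, 'students.update({name: 1})'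
-- is Dict.insert; 'students[student]' in the second loop is ported as getD _ 0, exact
-- because student ranges over the dict's own keys.
def get_students_in_multiple_clubs (clubs : List (String × List String)) : List String :=
  let students : PySem.Dict String Int :=
    clubs.foldl (fun students club =>
      club.2.foldl (fun students name =>
        if students.contains name then students.modify name 0 (· + 1)
        else students.insert name 1) students) PySem.Dict.empty
  students.keys.foldl (fun studentSet student =>
    if students.getD student 0 > 1 then PySem.Set.add studentSet student else studentSet)
    PySem.Set.empty

-- ===== PORT B =====
-- names = [name for members in clubs.values() for name in members];
-- return {name for i, name in enumerate(names) if name in names[i+1:]}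
def get_students_in_multiple_clubs_alt (clubs : List (String × List String)) : List String :=
  let names : List String := clubs.foldl (fun acc club => acc ++ club.2) []
  (PySem.List.enumerate names).foldl
    (fun s p => if (PySem.List.slice names (some (p.1 + 1)) none).contains p.2
                then PySem.Set.add s p.2 else s)
    PySem.Set.empty

-- ===== PRECONDITION & SPEC =====
def Spec_get_students_in_multiple_clubs (clubs : List (String × List String)) (out : List String) : Prop := out = get_students_in_multiple_clubs_alt clubs
instance (clubs : List (String × List String)) (out : List String) : Decidable (Spec_get_students_in_multiple_clubs clubs out) := by unfold Spec_get_students_in_multiple_clubs; infer_instance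

-- ===== CLAIM (what is proved, stated in full; the proofs are below) =====
def Claim_equal_get_students_in_multiple_clubs : Prop := ∀ (clubs : List (String × List String)), Dom_get_students_in_multiple_clubs clubs → Spec_get_students_in_multiple_clubs clubs (get_students_in_multiple_clubs clubs)

-- ===== LEMMAS AND PROOFS =====

-- the names that have another occurrence strictly later in the list
def dupList : List String → List String
  | [] => []
  | n :: rest => if rest.contains n then n :: dupList rest else dupList rest

-- A's counting step is exactly the Counter step
lemma stepA_eq_counter_step :
    (fun (d : PySem.Dict String Int) (name : String) =>
      if d.contains name then d.modify name 0 (· + 1) else d.insert name 1)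
    = fun d name => d.modify name 0 (· + 1) := by
  funext d name
  by_cases h : d.contains name
  · simp [h]
  · simp only [h, Bool.false_eq_true, if_false, PySem.Dict.modify, PySem.Dict.getD,
      (PySem.Dict.get?_eq_none_iff_contains d name).mpr (by simpa using h)]
    norm_num

-- A's nested dict-building loop builds Counter(flattened names)
lemma dictA_eq_counter (clubs : List (String × List String)) :
    clubs.foldl (fun students club =>
      club.2.foldl (fun students name =>
        if students.contains name then students.modify name 0 (· + 1)
        else students.insert name 1) students) PySem.Dict.empty
    = PySem.Dict.counter (clubs.flatMap (·.2)) := by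
  rw [PySem.Dict.counter, List.foldl_flatMap, stepA_eq_counter_step]

-- folding 'if P k then add' over a nodup list of fresh keys is append-filter
lemma foldl_filter_add (P : String → Prop) [DecidablePred P] :
    ∀ (l s : List String), l.Nodup → (∀ x ∈ l, x ∉ s) →
      l.foldl (fun t k => if P k then PySem.Set.add t k else t) s
        = s ++ l.filter (fun k => decide (P k)) := by
  intro l
  induction l with
  | nil => simp
  | cons x l ih =>
    intro s hnd hfresh
    have hxs : ¬ x ∈ s := hfresh x (by simp)
    have hadd : PySem.Set.add s x = s ++ [x] := by
      simp [PySem.Set.add, PySem.Set.contains, hxs]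
    by_cases hp : P x
    · simp only [List.foldl_cons, if_pos hp, hadd]
      rw [ih (s ++ [x]) hnd.of_cons]
      · simp [hp]
      · intro y hy
        simp only [List.mem_append, List.mem_singleton]
        rintro (h | rfl)
        · exact hfresh y (by simp [hy]) h
        · exact (List.nodup_cons.mp hnd).1 hy
    · simp only [List.foldl_cons, if_neg hp]
      rw [ih s hnd.of_cons (fun y hy => hfresh y (by simp [hy]))]
      simp [hp]

-- folding Set.add appends the unseen elements, first occurrences in order
lemma foldl_add_eq_append_filter :
    ∀ (xs : List String) (s : PySem.Set String),
      xs.foldl PySem.Set.add s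
        = s ++ (PySem.Set.ofList xs).filter (fun m => !s.contains m) := by
  intro xs
  induction xs with
  | nil => intro s; simp [PySem.Set.ofList]
  | cons x xs ih =>
    intro s
    have hofl : PySem.Set.ofList (x :: xs)
        = x :: (PySem.Set.ofList xs).filter (fun m => !(List.contains [x] m)) := by
      show (x :: xs).foldl PySem.Set.add PySem.Set.empty = _
      rw [List.foldl_cons, ih]
      have h0 : PySem.Set.add PySem.Set.empty x = [x] := by
        unfold PySem.Set.add PySem.Set.empty PySem.Set.contains
        simp
      rw [h0]
      rfl
    rw [List.foldl_cons, ih, hofl]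
    by_cases hx : x ∈ s
    · have hadd : PySem.Set.add s x = s := by
        unfold PySem.Set.add
        rw [if_pos ((PySem.Set.contains_iff s x).mpr hx)]
      rw [hadd]
      simp only [List.filter_cons]
      have hxf : (!PySem.Set.contains s x) = false := by
        simp [PySem.Set.contains, hx]
      rw [hxf]
      simp only [Bool.false_eq_true, if_false, List.filter_filter]
      congr 1
      apply List.filter_congr
      intro m _
      by_cases hmx : m = x
      · subst hmx; simp [PySem.Set.contains, hx]
      · simp [hmx]
    · have hadd : PySem.Set.add s x = s ++ [x] := by
        unfold PySem.Set.add
        rw [if_neg (fun h => hx ((PySem.Set.contains_iff s x).mp h))]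
      rw [hadd]
      simp only [List.filter_cons]
      have hxf : (!PySem.Set.contains s x) = true := by
        simp [PySem.Set.contains, hx]
      rw [hxf]
      simp only [if_true, List.append_assoc, List.singleton_append, List.filter_filter]
      congr 2
      apply List.filter_congr
      intro m _
      by_cases hmx : m = x
      · subst hmx; simp [PySem.Set.contains]
      · simp [PySem.Set.contains, hmx]

lemma ofList_cons (x : String) (xs : List String) :
    PySem.Set.ofList (x :: xs) = x :: (PySem.Set.ofList xs).filter (fun m => !(x == m)) := by
  have h : PySem.Set.ofList (x :: xs)
      = PySem.Set.add PySem.Set.empty x ++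
        (PySem.Set.ofList xs).filter (fun m => !(PySem.Set.add PySem.Set.empty x).contains m) := by
    show (x :: xs).foldl PySem.Set.add PySem.Set.empty = _
    rw [List.foldl_cons, foldl_add_eq_append_filter]
  have h0 : PySem.Set.add PySem.Set.empty x = [x] := by
    unfold PySem.Set.add PySem.Set.empty PySem.Set.contains
    simp
  rw [h, h0]
  simp only [List.singleton_append]
  congr 1
  apply List.filter_congr
  intro m _
  by_cases hmx : m = x
  · subst hmx; simp [PySem.Set.contains]
  · have : ¬ x = m := fun hh => hmx hh.symm
    simp [PySem.Set.contains, hmx, this]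

-- the heart: dedup of the has-a-later-duplicate list = dedup filtered by count > 1
lemma ofList_dupList (names : List String) :
    PySem.Set.ofList (dupList names)
      = (PySem.Set.ofList names).filter (fun m => decide (1 < names.count m)) := by
  induction names with
  | nil => simp [dupList, PySem.Set.ofList]
  | cons n rest ih =>
    rw [ofList_cons]
    by_cases hc : n ∈ rest
    · rw [show dupList (n :: rest) = n :: dupList rest by simp [dupList, hc]]
      rw [ofList_cons, ih]
      simp only [List.filter_cons, List.filter_filter]
      have hPn : (decide (1 < (n :: rest).count n)) = true := by
        have : 0 < rest.count n := List.count_pos_iff.mpr hc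
        simp [List.count_cons_self]
        omega
      rw [hPn]
      simp only [if_true]
      congr 1
      apply List.filter_congr
      intro m _
      by_cases hmn : n = m
      · subst hmn; simp
      · rw [List.count_cons_of_ne hmn]
        simp only [Bool.and_comm]
    · rw [show dupList (n :: rest) = dupList rest by simp [dupList, hc]]
      rw [ih]
      simp only [List.filter_cons, List.filter_filter]
      have hPn : (decide (1 < (n :: rest).count n)) = false := by
        have : rest.count n = 0 := by simp [List.count_eq_zero, hc]
        simp [List.count_cons_self, this]
      rw [hPn]
      simp only [Bool.false_eq_true, if_false]
      apply List.filter_congr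
      intro m hm
      by_cases hmn : m = n
      · subst hmn
        have : rest.count m = 0 := by simp [List.count_eq_zero, hc]
        simp [this]
      · have hnm : ¬ n = m := fun h => hmn h.symm
        rw [List.count_cons_of_ne hnm]
        simp [hnm]

-- B's enumerate-and-slice fold is the dupList fold
lemma enum_fold_eq_dupList :
    ∀ (rest : List String) (k : Nat) (full : List String) (s : PySem.Set String),
      full.drop k = rest →
      (PySem.List.enumerate rest (k : Int)).foldl
        (fun s p => if (PySem.List.slice full (some (p.1 + 1)) none).contains p.2
                    then PySem.Set.add s p.2 else s) s
        = (dupList rest).foldl PySem.Set.add s := by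
  intro rest
  induction rest with
  | nil => intro k full s h; rfl
  | cons n rest ih =>
    intro k full s h
    have henum : PySem.List.enumerate (n :: rest) (k : Int)
        = ((k : Int), n) :: PySem.List.enumerate rest ((k : Int) + 1) := rfl
    have hdrop : full.drop (k + 1) = rest := by
      rw [← List.drop_drop, h]
      simp
    have hslice : PySem.List.slice full (some ((k : Int) + 1)) none = rest := by
      rw [show ((k : Int) + 1) = ((k + 1 : Nat) : Int) by push_cast; ring,
        PySem.List.slice_from_natCast, hdrop]
    rw [henum, List.foldl_cons]
    simp only [hslice]
    have hcast : ((k : Int) + 1) = ((k + 1 : Nat) : Int) := by push_cast; ring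
    by_cases hc : n ∈ rest
    · have hcb : rest.contains n = true := by simp [hc]
      rw [show dupList (n :: rest) = n :: dupList rest by simp [dupList, hc]]
      rw [if_pos hcb, List.foldl_cons, hcast, ih (k + 1) full (PySem.Set.add s n) hdrop]
    · rw [show dupList (n :: rest) = dupList rest by simp [dupList, hc]]
      rw [if_neg (by simp [hc]), hcast, ih (k + 1) full s hdrop]

-- ===== VERDICT (by name: the statement is the Claim_ definition above) =====
theorem get_students_in_multiple_clubs_spec : Claim_equal_get_students_in_multiple_clubs := by
  intro clubs _
  show get_students_in_multiple_clubs clubs = get_students_in_multiple_clubs_alt clubs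
  have hnames : clubs.foldl (fun acc club => acc ++ club.2) ([] : List String)
      = clubs.flatMap (·.2) := by
    simpa using PySem.List.foldl_append_eq_flatMap (·.2) clubs []
  simp only [get_students_in_multiple_clubs, get_students_in_multiple_clubs_alt,
    dictA_eq_counter, hnames]
  rw [foldl_filter_add (fun k => (PySem.Dict.counter (clubs.flatMap (·.2))).getD k 0 > 1)
      _ _ (PySem.Dict.nodup_keys_counter _) (by intro x _ hx; simp [PySem.Set.empty] at hx)]
  have henum := enum_fold_eq_dupList (clubs.flatMap (·.2)) 0 (clubs.flatMap (·.2))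
    PySem.Set.empty (by simp)
  simp only [Nat.cast_zero] at henum
  rw [henum]
  rw [show (dupList (clubs.flatMap (·.2))).foldl PySem.Set.add PySem.Set.empty
      = PySem.Set.ofList (dupList (clubs.flatMap (·.2))) from rfl]
  rw [ofList_dupList, PySem.Dict.keys_counter]
  simp only [PySem.Set.empty, List.nil_append]
  apply List.filter_congr
  intro m _
  rw [PySem.Dict.getD_counter]
  simp only [decide_eq_decide]
  omega
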